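-- pv_equiv track=rewrite | github.com/Nellodipolito/streamlit-app | app/agent.py | format_docs_with_id
-- ===== SOURCE A (Python) =====
-- from typing import List, Dict, Any, Tuple
--
-- def format_docs_with_id(results: List[Dict]) -> str:
--     """Format documents with unique IDs for citation tracking, grouping by source URL."""
--     # Group chunks by their source URL (same source = same URL)
--     grouped_by_url = {}
--     for result in results:
--         url = result.get('url', '')
--         if url not in grouped_by_url:
--             grouped_by_url[url] = []
--         grouped_by_url[url].append(result)
--
--     parts = []
--     for i, (url, chunks) in enumerate(grouped_by_url.items(), 1):
--         # Get metadata from first chunk (they should be the same for same source)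
--         first_chunk = chunks[0]
--         title = first_chunk.get('title', '')
--         meta_desc = first_chunk.get('meta_desc', '')
--
--         # Combine all content from this source
--         combined_content = []
--         for chunk in chunks:
--             content = chunk.get('content', '')
--             if content:
--                 combined_content.append(content)
--
--         # Join all content with separators
--         full_content = "\n\n---\n\n".join(combined_content)
--
--         parts.append(
--             f"SOURCE ID: {i}\n"
--             f"TITLE:     {title}\n"
--             f"SUMMARY:   {meta_desc}\n"
--             f"CONTENT:   {full_content}"
--         )
--
--     return "\n\n".join(parts)
-- ===== SOURCE B (Python) =====
-- def format_docs_with_id(results):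
--     """Format documents with unique IDs for citation tracking, grouping by source URL.
--
--     No grouping dict at all: take the ordered dedup of source URLs, then for each
--     URL re-scan the results with list comprehensions (O(u*n) scans instead of a
--     hash-grouped single pass)."""
--     urls = list(dict.fromkeys(r.get('url', '') for r in results))
--     blocks = [
--         f"SOURCE ID: {i}\n"
--         f"TITLE:     {chunks[0].get('title', '')}\n"
--         f"SUMMARY:   {chunks[0].get('meta_desc', '')}\n"
--         f"CONTENT:   "
--         + "\n\n---\n\n".join(c for c in (r.get('content', '') for r in chunks) if c)
--         for i, url in enumerate(urls, 1)
--         for chunks in [[r for r in results if r.get('url', '') == url]]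
--     ]
--     return "\n\n".join(blocks)
-- ===== Notes on version B (the rewrite author's own statement) =====
-- stated objective: alternative
-- what changed: A builds a url-keyed dict of grouped chunk lists in one pass and then formats each group; B keeps no grouping structure at all: it deduplicates the url sequence in order and, per url, re-scans the whole result list with filter comprehensions (O(u*n) scans instead of hash grouping).
import Mathlib
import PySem

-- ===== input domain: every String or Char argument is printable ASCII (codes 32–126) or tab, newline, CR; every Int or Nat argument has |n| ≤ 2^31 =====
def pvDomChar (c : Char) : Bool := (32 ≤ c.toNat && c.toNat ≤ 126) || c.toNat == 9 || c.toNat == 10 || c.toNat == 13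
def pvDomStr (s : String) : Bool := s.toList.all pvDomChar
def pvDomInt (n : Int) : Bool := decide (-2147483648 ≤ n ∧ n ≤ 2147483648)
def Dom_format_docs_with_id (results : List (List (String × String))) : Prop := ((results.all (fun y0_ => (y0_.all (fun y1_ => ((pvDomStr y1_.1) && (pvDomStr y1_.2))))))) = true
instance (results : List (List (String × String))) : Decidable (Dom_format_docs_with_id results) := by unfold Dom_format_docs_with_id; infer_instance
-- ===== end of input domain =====

-- B drops A's url-keyed grouping dict: it deduplicates the url sequence in order and
-- re-scans the result list per url with filter comprehensions (objective: alternative).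

-- ===== PORT A =====
-- result.get(key, '') on a Python dict, ported as first-match association-list lookup
def pvGet (r : List (String × String)) (k : String) : String :=
  (PySem.Dict.mk r).getD k ""

-- body of A's grouping loop: ensure the key exists, then append the whole result
def fdwiGroupStep (d : PySem.Dict String (List (List (String × String))))
    (result : List (String × String)) : PySem.Dict String (List (List (String × String))) :=
  let url := pvGet result "url"
  let d := if d.contains url then d else d.insert url []
  d.modify url [] (fun l => l ++ [result])

-- body of A's formatting loop over enumerate(grouped.items(), 1)
def fdwiPartStep (parts : List String)
    (p : Int × String × List (List (String × String))) : List String :=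
  let chunks := p.2.2
  let first_chunk := (PySem.List.pyGet? chunks 0).getD []   -- chunks[0]; chunks is never empty
  let title := pvGet first_chunk "title"
  let meta_desc := pvGet first_chunk "meta_desc"
  let combined_content := chunks.foldl
    (fun acc chunk => if pvGet chunk "content" ≠ "" then acc ++ [pvGet chunk "content"] else acc) []
  let full_content := PySem.Str.join "\n\n---\n\n" combined_content
  parts ++ ["SOURCE ID: " ++ PySem.Int.toStr p.1 ++ "\nTITLE:     " ++ title ++
            "\nSUMMARY:   " ++ meta_desc ++ "\nCONTENT:   " ++ full_content]

def format_docs_with_id (results : List (List (String × String))) : String :=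
  let grouped := results.foldl fdwiGroupStep PySem.Dict.empty
  let parts := (PySem.List.enumerate grouped.items 1).foldl fdwiPartStep []
  PySem.Str.join "\n\n" parts

-- ===== PORT B =====
-- list(dict.fromkeys(…)) = ordered dedup; each block re-scans results for its url
def format_docs_with_id_alt (results : List (List (String × String))) : String :=
  let urls := PySem.List.dedup (results.map (fun r => pvGet r "url"))
  let blocks := (PySem.List.enumerate urls 1).map (fun p =>
    let chunks := results.filter (fun r => pvGet r "url" == p.2)
    "SOURCE ID: " ++ PySem.Int.toStr p.1 ++ "\nTITLE:     " ++
    pvGet ((PySem.List.pyGet? chunks 0).getD []) "title" ++ "\nSUMMARY:   " ++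
    pvGet ((PySem.List.pyGet? chunks 0).getD []) "meta_desc" ++ "\nCONTENT:   " ++
    PySem.Str.join "\n\n---\n\n"
      ((chunks.map (fun r => pvGet r "content")).filter (fun c => c ≠ "")))
  PySem.Str.join "\n\n" blocks

-- ===== PRECONDITION & SPEC =====
def Spec_format_docs_with_id (results : List (List (String × String))) (out : String) : Prop := out = format_docs_with_id_alt results
instance (results : List (List (String × String))) (out : String) : Decidable (Spec_format_docs_with_id results out) := by unfold Spec_format_docs_with_id; infer_instance

-- ===== CLAIM =====
def Claim_equal_format_docs_with_id : Prop := ∀ (results : List (List (String × String))), Dom_format_docs_with_id results → Spec_format_docs_with_id results (format_docs_with_id results)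

-- ===== LEMMAS AND PROOFS =====

-- proof-side abbreviations
def fdwiF (results : List (List (String × String))) (u : String) : List (List (String × String)) :=
  results.filter (fun r => pvGet r "url" == u)

def fdwiBlockA (p : Int × String × List (List (String × String))) : String :=
  let chunks := p.2.2
  let first_chunk := (PySem.List.pyGet? chunks 0).getD []
  "SOURCE ID: " ++ PySem.Int.toStr p.1 ++ "\nTITLE:     " ++ pvGet first_chunk "title" ++
  "\nSUMMARY:   " ++ pvGet first_chunk "meta_desc" ++ "\nCONTENT:   " ++
  PySem.Str.join "\n\n---\n\n"
    (chunks.foldl (fun acc chunk => if pvGet chunk "content" ≠ "" then acc ++ [pvGet chunk "content"] else acc) [])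

def fdwiBlockB (results : List (List (String × String))) (p : Int × String) : String :=
  let chunks := results.filter (fun r => pvGet r "url" == p.2)
  "SOURCE ID: " ++ PySem.Int.toStr p.1 ++ "\nTITLE:     " ++
  pvGet ((PySem.List.pyGet? chunks 0).getD []) "title" ++ "\nSUMMARY:   " ++
  pvGet ((PySem.List.pyGet? chunks 0).getD []) "meta_desc" ++ "\nCONTENT:   " ++
  PySem.Str.join "\n\n---\n\n"
    ((chunks.map (fun r => pvGet r "content")).filter (fun c => c ≠ ""))

lemma fdwiGroupStep_eq (d : PySem.Dict String (List (List (String × String))))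
    (r : List (String × String)) :
    fdwiGroupStep d r = d.modify (pvGet r "url") [] (fun l => l ++ [r]) := by
  unfold fdwiGroupStep
  by_cases h : d.contains (pvGet r "url")
  · simp [h]
  · simp only [if_neg h, PySem.Dict.modify, PySem.Dict.getD_insert_self,
      PySem.Dict.insert_insert_self,
      PySem.Dict.getD_of_not_contains d [] (by simpa using h)]

lemma fdwiGrouped_getD_gen (l : List (List (String × String))) (u : String) :
    ∀ d : PySem.Dict String (List (List (String × String))),
    (List.foldl (fun d r => d.modify (pvGet r "url") [] (fun a => a ++ [r])) d l).getD u []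
      = d.getD u [] ++ fdwiF l u := by
  induction l with
  | nil => intro d; simp [fdwiF]
  | cons x l ih =>
    intro d
    rw [List.foldl_cons, ih]
    by_cases hx : pvGet x "url" = u
    · rw [show fdwiF (x :: l) u = x :: fdwiF l u by simp [fdwiF, hx],
        PySem.Dict.getD_modify]
      simp [hx]
    · rw [show fdwiF (x :: l) u = fdwiF l u by simp [fdwiF, hx],
        PySem.Dict.getD_modify]
      simp [Ne.symm hx]

lemma fdwiGrouped_getD (results : List (List (String × String))) (u : String) :
    (results.foldl fdwiGroupStep PySem.Dict.empty).getD u [] = fdwiF results u := by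
  rw [PySem.List.foldl_congr_mem results fdwiGroupStep
    (fun (d : PySem.Dict String (List (List (String × String)))) r =>
      d.modify (pvGet r "url") [] (fun a => a ++ [r]))
    PySem.Dict.empty (fun acc x hx => fdwiGroupStep_eq acc x)]
  rw [fdwiGrouped_getD_gen results u PySem.Dict.empty]
  simp [PySem.Dict.getD_empty]

lemma fdwiPartStep_eq (acc : List String) (p : Int × String × List (List (String × String))) :
    fdwiPartStep acc p = acc ++ [fdwiBlockA p] := by
  rfl

lemma fdwiFilterMap (l : List (List (String × String))) :
    (l.map (fun r => pvGet r "content")).filter (fun c => c ≠ "") =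
      (l.filter (fun r => pvGet r "content" ≠ "")).map (fun r => pvGet r "content") := by
  rw [List.filter_map]
  rfl

lemma fdwiBlock_eq (results : List (List (String × String))) (i : Int) (k : String) :
    fdwiBlockA (i, k, fdwiF results k) = fdwiBlockB results (i, k) := by
  have hfold : (fdwiF results k).foldl
      (fun acc chunk => if pvGet chunk "content" ≠ "" then acc ++ [pvGet chunk "content"] else acc)
      ([] : List String)
      = ((fdwiF results k).filter (fun r => pvGet r "content" ≠ "")).map (fun r => pvGet r "content") := by
    rw [PySem.List.foldl_append_ite (p := fun chunk => pvGet chunk "content" ≠ "")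
      (f := fun chunk => pvGet chunk "content")]
    simp
  simp only [fdwiF] at hfold
  simp only [fdwiBlockA, fdwiBlockB, fdwiF, fdwiFilterMap, hfold]

lemma fdwiBlocks_map_eq (results : List (List (String × String))) (K : List String) :
    ∀ (i : Int),
    (PySem.List.enumerate (K.map (fun k => (k, fdwiF results k))) i).map fdwiBlockA
      = (PySem.List.enumerate K i).map (fdwiBlockB results) := by
  induction K with
  | nil => intro i; simp
  | cons k K ih =>
    intro i
    simp only [List.map_cons, PySem.List.enumerate_cons, List.map]
    rw [fdwiBlock_eq results i k, ih (i + 1)]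

theorem format_docs_with_id_spec_aux (results : List (List (String × String))) :
    format_docs_with_id results = format_docs_with_id_alt results := by
  have hcgA : results.foldl fdwiGroupStep PySem.Dict.empty =
      results.foldl (fun (d : PySem.Dict String (List (List (String × String)))) r =>
        d.modify (pvGet r "url") [] (fun a => a ++ [r])) PySem.Dict.empty :=
    PySem.List.foldl_congr_mem results fdwiGroupStep _ PySem.Dict.empty
      (fun acc x hx => fdwiGroupStep_eq acc x)
  have hndA : (results.foldl fdwiGroupStep PySem.Dict.empty).keys.Nodup := by
    rw [hcgA]
    exact PySem.Dict.nodup_keys_foldl_modify_key results (fun r => pvGet r "url") []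
      (fun _ r => fun a => a ++ [r]) PySem.Dict.empty (by simp [PySem.Dict.keys_empty])
  have hkeys : (results.foldl fdwiGroupStep PySem.Dict.empty).keys
      = PySem.List.dedup (results.map (fun r => pvGet r "url")) := by
    rw [hcgA, PySem.Dict.keys_foldl_modify_key results (fun r => pvGet r "url") []
        (fun _ r => fun a => a ++ [r]) PySem.Dict.empty]
    simp [PySem.Dict.keys_empty, PySem.Set.update_nil_left]
  have hitemsA : (results.foldl fdwiGroupStep PySem.Dict.empty).items
      = ((results.foldl fdwiGroupStep PySem.Dict.empty).keys).map
          (fun k => (k, fdwiF results k)) := by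
    rw [PySem.Dict.items_eq_map_keys _ hndA []]
    exact List.map_congr_left (fun k _ => by rw [fdwiGrouped_getD results k])
  show PySem.Str.join "\n\n"
      ((PySem.List.enumerate (results.foldl fdwiGroupStep PySem.Dict.empty).items 1).foldl
        fdwiPartStep [])
    = PySem.Str.join "\n\n"
      ((PySem.List.enumerate (PySem.List.dedup (results.map (fun r => pvGet r "url"))) 1).map
        (fdwiBlockB results))
  rw [hitemsA, hkeys,
    PySem.List.foldl_congr_mem _ fdwiPartStep (fun acc p => acc ++ [fdwiBlockA p]) []
      (fun acc x hx => fdwiPartStep_eq acc x),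
    PySem.List.foldl_append_singleton_eq_map, List.nil_append,
    fdwiBlocks_map_eq results _ 1]

-- ===== VERDICT (by name: the statement is the Claim_ definition above) =====
theorem format_docs_with_id_spec : Claim_equal_format_docs_with_id := by
  intro results _
  exact format_docs_with_id_spec_aux results
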